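-- pv_equiv track=rewrite | github.com/TOB1EH/Blockchain-y-Contratos-Inteligentes | TP/3/show_transactions.py | formatear_monto
-- ===== SOURCE A (Python) =====
-- def formatear_monto(valor_wei):
--     """Convierte wei a la unidad más legible que dé un número entero exacto.
--         :param valor_wei: El monto en wei a formatear.
--         :return: Una cadena con el monto formateado y su unidad (ether, Gwei, Kwei o wei).
--     """
--     if valor_wei == 0:
--         return "0 wei"
--
--     # Lista de unidades ordenada de mayor a menor, ya que si si se lo ordena de menor a mayor,
--     # el resultado siempre va a ser en wei (porque es múltiplo de sí mismo). En cambio,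
--     # ordenando de mayor a menor, se obtiene la unidad más grande posible que dé un número entero.
--     unidades = [
--         (10**18, "ether"),
--         (10**9,  "Gwei"),
--         (10**3,  "Kwei"),
--         (1,      "wei"),
--     ]
--
--     # Iterar sobre las unidades y devolver la primera que sea un divisor exacto del valor en wei.
--     for factor, nombre in unidades:
--         # Si el valor en wei es exactamente divisible por el factor, se puede expresar en esa
--         # unidad sin decimales.
--         if valor_wei % factor == 0:
--             # Dividir el valor en wei por el factor para obtener la cantidad en la unidad
--             # correspondiente, y devolverla formateada.
--             return f"{valor_wei // factor} {nombre}"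
-- ===== SOURCE B (Python) =====
-- def formatear_monto(valor_wei):
--     if valor_wei == 0:
--         return "0 wei"
--     # Count trailing decimal zeros with one loop instead of testing each unit factor.
--     n = valor_wei
--     cnt = 0
--     while n % 10 == 0 and n != 0:
--         n //= 10
--         cnt += 1
--     if cnt >= 18:
--         factor, nombre = 10**18, "ether"
--     elif cnt >= 9:
--         factor, nombre = 10**9, "Gwei"
--     elif cnt >= 3:
--         factor, nombre = 10**3, "Kwei"
--     else:
--         factor, nombre = 1, "wei"
--     return f"{valor_wei // factor} {nombre}"
-- ===== Notes on version B (the rewrite author's own statement) =====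
-- stated objective: alternative
-- what changed: B counts the trailing decimal zeros of the value with one division loop and picks the unit by thresholding that count, instead of testing the value against each unit factor from a table.
import Mathlib
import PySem

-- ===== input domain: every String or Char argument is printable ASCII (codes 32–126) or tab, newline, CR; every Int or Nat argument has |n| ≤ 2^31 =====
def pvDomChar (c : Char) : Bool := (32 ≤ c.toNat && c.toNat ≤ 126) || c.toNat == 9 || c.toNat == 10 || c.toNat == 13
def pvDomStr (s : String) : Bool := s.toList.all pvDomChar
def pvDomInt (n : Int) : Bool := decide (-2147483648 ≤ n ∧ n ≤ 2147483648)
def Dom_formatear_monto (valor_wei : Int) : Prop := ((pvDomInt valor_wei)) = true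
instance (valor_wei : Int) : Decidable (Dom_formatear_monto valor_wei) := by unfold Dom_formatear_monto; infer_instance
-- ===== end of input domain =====

-- B replaces A's table of unit factors by one trailing-zero-counting loop plus thresholds (objective: alternative decomposition, same cost).

-- ===== PORT A =====
-- the for-loop over the literal unit list, first factor that divides wins;
-- the [] case is unreachable (factor 1 always divides a nonzero value)
def fmLoop (valor_wei : Int) : List (Int × String) → String
  | [] => ""
  | (factor, nombre) :: rest =>
      if PySem.Int.mod valor_wei factor = 0 then
        PySem.Int.toStr (PySem.Int.floordiv valor_wei factor) ++ " " ++ nombre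
      else fmLoop valor_wei rest

def formatear_monto (valor_wei : Int) : String :=
  if valor_wei = 0 then "0 wei"
  else fmLoop valor_wei [(10 ^ 18, "ether"), (10 ^ 9, "Gwei"), (10 ^ 3, "Kwei"), (1, "wei")]

-- ===== PORT B =====
-- while n % 10 == 0 and n != 0: n //= 10; cnt += 1
def tzCount (n : Int) : Nat :=
  if h : PySem.Int.mod n 10 = 0 ∧ n ≠ 0 then tzCount (PySem.Int.floordiv n 10) + 1
  else 0
termination_by n.natAbs
decreasing_by
  obtain ⟨c, hc⟩ := (PySem.Int.mod_eq_zero_iff_dvd n 10).mp h.1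
  have hc0 : c ≠ 0 := by rintro rfl; exact h.2 (by simpa using hc)
  have : PySem.Int.floordiv n 10 = c := by
    rw [PySem.Int.floordiv_eq_ediv_of_pos (by norm_num), hc, Int.mul_ediv_cancel_left _ (by norm_num)]
  rw [this, hc]
  have h1 : 1 ≤ c.natAbs := by omega
  have : (10 * c).natAbs = 10 * c.natAbs := by
    simpa using Int.natAbs_mul 10 c
  omega

def formatear_monto_alt (valor_wei : Int) : String :=
  if valor_wei = 0 then "0 wei"
  else
    let cnt := tzCount valor_wei
    let fu : Int × String :=
      if 18 ≤ cnt then (10 ^ 18, "ether")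
      else if 9 ≤ cnt then (10 ^ 9, "Gwei")
      else if 3 ≤ cnt then (10 ^ 3, "Kwei")
      else (1, "wei")
    PySem.Int.toStr (PySem.Int.floordiv valor_wei fu.1) ++ " " ++ fu.2

-- ===== PRECONDITION & SPEC =====
def Spec_formatear_monto (valor_wei : Int) (out : String) : Prop := out = formatear_monto_alt valor_wei
instance (valor_wei : Int) (out : String) : Decidable (Spec_formatear_monto valor_wei out) := by unfold Spec_formatear_monto; infer_instance

-- ===== CLAIM (what is proved, stated in full; the proofs are below) =====
def Claim_equal_formatear_monto : Prop := ∀ (valor_wei : Int), Dom_formatear_monto valor_wei → Spec_formatear_monto valor_wei (formatear_monto valor_wei)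

-- ===== LEMMAS AND PROOFS =====

-- the trailing-zero count characterises divisibility by powers of ten
theorem tz_iff (n : Int) (hn : n ≠ 0) (k : Nat) : k ≤ tzCount n ↔ (10 : Int) ^ k ∣ n := by
  rw [tzCount]
  by_cases h10 : PySem.Int.mod n 10 = 0
  · obtain ⟨c, hc⟩ := (PySem.Int.mod_eq_zero_iff_dvd n 10).mp h10
    have hc0 : c ≠ 0 := by rintro rfl; exact hn (by simpa using hc)
    have hfd : PySem.Int.floordiv n 10 = c := by
      rw [PySem.Int.floordiv_eq_ediv_of_pos (by norm_num), hc,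
        Int.mul_ediv_cancel_left _ (by norm_num)]
    simp only [h10, hn, ne_eq, not_false_eq_true, and_self, dite_true, hfd]
    cases k with
    | zero => simp
    | succ k' =>
      have ih := tz_iff c hc0 k'
      rw [hc, pow_succ]
      constructor
      · intro hk
        have := ih.mp (by omega)
        exact mul_comm ((10:Int)^k') 10 ▸ mul_dvd_mul_left 10 this
      · intro hd
        have : (10:Int) ^ k' ∣ c := by
          have h' : (10:Int) * 10 ^ k' ∣ 10 * c := by
            rwa [mul_comm ((10:Int)^k') 10] at hd
          exact (mul_dvd_mul_iff_left (by norm_num : (10:Int) ≠ 0)).mp h'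
        have := ih.mpr this
        omega
  · simp only [h10, false_and, dite_false]
    cases k with
    | zero => simp
    | succ k' =>
      constructor
      · omega
      · intro hd
        exfalso
        apply h10
        rw [PySem.Int.mod_eq_zero_iff_dvd]
        exact dvd_trans (dvd_pow_self 10 (Nat.succ_ne_zero k')) hd
termination_by n.natAbs
decreasing_by
  obtain ⟨c2, hc2⟩ := (PySem.Int.mod_eq_zero_iff_dvd n 10).mp h10
  have : c = c2 := by omega
  subst this
  rw [hc2]
  have h1 : 1 ≤ c.natAbs := by omega
  have : (10 * c).natAbs = 10 * c.natAbs := by simpa using Int.natAbs_mul 10 c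
  omega

-- ===== VERDICT (by name: the statement is the Claim_ definition above) =====
theorem formatear_monto_spec : Claim_equal_formatear_monto := by
  intro v _
  unfold Spec_formatear_monto formatear_monto formatear_monto_alt
  by_cases hv : v = 0
  · simp [hv]
  · simp only [hv, if_false]
    have e18 : PySem.Int.mod v (10 ^ 18) = 0 ↔ 18 ≤ tzCount v :=
      (PySem.Int.mod_eq_zero_iff_dvd v (10 ^ 18)).trans (tz_iff v hv 18).symm
    have e9 : PySem.Int.mod v (10 ^ 9) = 0 ↔ 9 ≤ tzCount v :=
      (PySem.Int.mod_eq_zero_iff_dvd v (10 ^ 9)).trans (tz_iff v hv 9).symm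
    have e3 : PySem.Int.mod v (10 ^ 3) = 0 ↔ 3 ≤ tzCount v :=
      (PySem.Int.mod_eq_zero_iff_dvd v (10 ^ 3)).trans (tz_iff v hv 3).symm
    have e1 : PySem.Int.mod v 1 = 0 := (PySem.Int.mod_eq_zero_iff_dvd v 1).mpr (one_dvd v)
    simp only [fmLoop]
    split_ifs with h18 h9 h3 <;>
      simp_all
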